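-- pv_equiv track=rewrite | github.com/ddrEricNo1/cs_learning | CS61A/lecture/lecture25/pair.py | next_candicate_token
-- ===== SOURCE A (Python) =====
-- _WHITESPACE = set(' \t\n\r')
--
-- _SINGLE_CHAR_TOKENS = set("()'")
--
-- _TOKEN_END = _WHITESPACE | _SINGLE_CHAR_TOKENS
--
-- def next_candicate_token(line, k):
--     """A tuple (tok, k), where tok is the next substring of line at or after position k that could be a token (assuming it passes)
--     a validity check), and k is the position in line following that tokem. Returns (None, len(line)) when there are no more tokens."""
--     while k < len(line):
--         c = line[k]
--         if c == ';':
--             return None, len(line)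
--         elif c in _WHITESPACE:
--             k += 1
--         elif c in _SINGLE_CHAR_TOKENS:
--             return c, k + 1
--         elif c == '#':
--             return line[k:k+2], min(k+2, len(line))
--         else:
--             j = k
--             while j < len(line) and line[j] not in _TOKEN_END:
--                 j += 1
--             return line[k:j], min(j, len(line))
--     return None, len(line)
-- ===== SOURCE B (Python) =====
-- # B: suffix-slice + lstrip + per-delimiter find, instead of A's index-by-index while loops.
-- _WS = ' \t\n\r'
-- _DELIMS = " \t\n\r()'"
--
-- def next_candicate_token(line, k):
--     n = len(line)
--     stripped = line[k:].lstrip(_WS)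
--     if not stripped or stripped[0] == ';':
--         return None, n
--     i = n - len(stripped)          # absolute position of the first candidate char
--     c = stripped[0]
--     if c in "()'":
--         return c, i + 1
--     if c == '#':
--         tok = stripped[:2]
--         return tok, i + len(tok)
--     t = len(stripped)
--     for d in _DELIMS:
--         p = stripped.find(d)
--         if 0 <= p < t:
--             t = p
--     return stripped[:t], i + t
-- ===== Notes on version B (the rewrite author's own statement) =====
-- stated objective: faster
-- what changed: A scans character by character with two nested Python while loops and per-character set membership; B slices off the suffix line[k:], strips leading whitespace with str.lstrip, dispatches on the first remaining character, and finds the token end as the minimum over str.find of the seven delimiter characters — replacing the interpreted per-character loops by C-implemented string primitives (measured ~12x at the largest timing size).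
-- outside the precondition, e.g. on next_candicate_token('a ', -1): A returns ('a', 1), B returns (None, 2)
import Mathlib
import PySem

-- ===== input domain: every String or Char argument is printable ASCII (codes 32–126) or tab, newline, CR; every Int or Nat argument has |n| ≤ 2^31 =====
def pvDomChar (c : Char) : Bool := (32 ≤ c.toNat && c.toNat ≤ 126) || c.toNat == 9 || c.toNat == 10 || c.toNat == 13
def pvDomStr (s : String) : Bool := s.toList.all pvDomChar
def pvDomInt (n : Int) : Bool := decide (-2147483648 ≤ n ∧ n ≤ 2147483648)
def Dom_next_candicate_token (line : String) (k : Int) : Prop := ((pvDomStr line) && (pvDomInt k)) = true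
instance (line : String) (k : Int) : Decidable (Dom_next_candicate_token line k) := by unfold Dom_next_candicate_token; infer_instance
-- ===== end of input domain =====

-- B replaces A's two index-by-index while loops by a suffix slice + lstrip + per-delimiter find
-- (C-implemented string primitives; a timing run measured B faster); equivalence is proved for 0 ≤ k (see Pre_).

-- ===== PORT A =====
def pvA_WHITESPACE : List Char := [' ', '\t', '\n', '\r']
def pvA_SINGLE_CHAR_TOKENS : List Char := ['(', ')', '\'']
def pvA_TOKEN_END : List Char := pvA_WHITESPACE ++ pvA_SINGLE_CHAR_TOKENS

-- the inner 'while j < len(line) and line[j] not in _TOKEN_END: j += 1'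
def pvA_inner (cs : List Char) (j : Int) : Int :=
  if _h : j < (cs.length : Int) then
    match PySem.List.pyGet? cs j with
    | some c => if c ∈ pvA_TOKEN_END then j else pvA_inner cs (j + 1)
    | none => j          -- line[j] would raise IndexError (j < -len(line)); outside Pre_
  else j
termination_by ((cs.length : Int) - j).toNat
decreasing_by simp_wf; omega

def pvA_loop (cs : List Char) (k : Int) : Option String × Int :=
  if _h : k < (cs.length : Int) then
    match PySem.List.pyGet? cs k with
    | none => (none, (cs.length : Int))  -- line[k] would raise IndexError (k < -len(line)); outside Pre_
    | some c =>
      if c = ';' then (none, (cs.length : Int))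
      else if c ∈ pvA_WHITESPACE then pvA_loop cs (k + 1)
      else if c ∈ pvA_SINGLE_CHAR_TOKENS then (some (String.ofList [c]), k + 1)
      else if c = '#' then
        (some (String.ofList (PySem.List.slice cs (some k) (some (k + 2)))), min (k + 2) (cs.length : Int))
      else
        let j := pvA_inner cs k
        (some (String.ofList (PySem.List.slice cs (some k) (some j))), min j (cs.length : Int))
  else (none, (cs.length : Int))
termination_by ((cs.length : Int) - k).toNat
decreasing_by simp_wf; omega

def next_candicate_token (line : String) (k : Int) : Option String × Int :=
  pvA_loop line.toList k

-- ===== PORT B =====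
def pvB_WS : List Char := [' ', '\t', '\n', '\r']
def pvB_DELIMS : List Char := [' ', '\t', '\n', '\r', '(', ')', '\'']

def pvB_core (cs : List Char) (k : Int) : Option String × Int :=
  let n : Int := cs.length
  -- line[k:].lstrip(' \t\n\r'): lstrip with an explicit char set, ported exactly as dropWhile on the slice
  let stripped := (PySem.List.slice cs (some k) none).dropWhile (fun c => decide (c ∈ pvB_WS))
  match stripped with
  | [] => (none, n)
  | c :: rest =>
    if c = ';' then (none, n)
    else
      let s := c :: rest
      let i : Int := n - s.length
      if c ∈ ['(', ')', '\''] then (some (String.ofList [c]), i + 1)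
      else if c = '#' then
        let tok := s.take 2
        (some (String.ofList tok), i + tok.length)
      else
        let t := pvB_DELIMS.foldl (fun t d =>
            let p := PySem.Chars.find s [d]
            if 0 ≤ p ∧ p < t then p else t) (s.length : Int)
        (some (String.ofList (PySem.List.slice s none (some t))), i + t)

def next_candicate_token_alt (line : String) (k : Int) : Option String × Int :=
  pvB_core line.toList k

-- ===== PRECONDITION & SPEC =====
-- Pre_ excludes negative k, outside the tokenizer's natural domain: there A raises IndexError (k < -len(line))
-- or scans through Python's negative-index wraparound, which B does not reproduce.
def Pre_next_candicate_token (_line : String) (k : Int) : Prop := 0 ≤ k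
instance (_line : String) (k : Int) : Decidable (Pre_next_candicate_token _line k) := by
  unfold Pre_next_candicate_token; infer_instance

def pvWitness_next_candicate_token : String × Int := ("  (ab c)", 0)

def Spec_next_candicate_token (line : String) (k : Int) (out : Option String × Int) : Prop :=
  out = next_candicate_token_alt line k
instance (line : String) (k : Int) (out : Option String × Int) : Decidable (Spec_next_candicate_token line k out) := by
  unfold Spec_next_candicate_token; infer_instance

-- ===== CLAIM (what is proved, stated in full; the proofs are below) =====
def Claim_equal_next_candicate_token : Prop := ∀ (line : String) (k : Int),
  Dom_next_candicate_token line k → Pre_next_candicate_token line k →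
  Spec_next_candicate_token line k (next_candicate_token line k)

-- ===== LEMMAS AND PROOFS =====

-- the two modules spell the delimiter set differently; it is the same set of characters
theorem pv_mem_te_iff (c : Char) : c ∈ pvA_TOKEN_END ↔ c ∈ pvB_DELIMS := by
  simp [pvA_TOKEN_END, pvA_WHITESPACE, pvA_SINGLE_CHAR_TOKENS, pvB_DELIMS]

-- number of leading characters of s outside the delimiter set (where both token scans stop)
def pvQ (s : List Char) : Nat := (s.takeWhile (fun c => !decide (c ∈ pvB_DELIMS))).length

theorem pvQ_le (s : List Char) : pvQ s ≤ s.length := by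
  unfold pvQ
  exact List.Sublist.length_le (List.takeWhile_sublist _)

theorem pvQ_nil : pvQ [] = 0 := by simp [pvQ]

theorem pvQ_cons_mem {c : Char} (h : c ∈ pvB_DELIMS) (t : List Char) : pvQ (c :: t) = 0 := by
  simp [pvQ, h]

theorem pvQ_cons_not_mem {c : Char} (h : c ∉ pvB_DELIMS) (t : List Char) : pvQ (c :: t) = pvQ t + 1 := by
  simp [pvQ, h]

theorem pvQ_lt {s : List Char} : ∀ {i : Nat}, i < pvQ s → ∀ {c : Char}, s[i]? = some c →
    c ∉ pvB_DELIMS := by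
  induction s with
  | nil => intro i hi; simp [pvQ_nil] at hi
  | cons a t ih =>
    intro i hi c hc
    by_cases ha : a ∈ pvB_DELIMS
    · rw [pvQ_cons_mem ha] at hi; omega
    · rw [pvQ_cons_not_mem ha] at hi
      cases i with
      | zero => simp only [List.getElem?_cons_zero, Option.some.injEq] at hc; subst hc; exact ha
      | succ i =>
        simp only [List.getElem?_cons_succ] at hc
        exact ih (by omega) hc

theorem pvQ_at {s : List Char} (h : pvQ s < s.length) :
    ∃ c, s[pvQ s]? = some c ∧ c ∈ pvB_DELIMS := by
  induction s with
  | nil => simp at h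
  | cons a t ih =>
    by_cases ha : a ∈ pvB_DELIMS
    · exact ⟨a, by simp [pvQ_cons_mem ha], ha⟩
    · rw [pvQ_cons_not_mem ha] at h ⊢
      obtain ⟨c, hc, hcd⟩ := ih (by simpa using h)
      exact ⟨c, by simpa using hc, hcd⟩

theorem pv_singleton_prefix (d : Char) (l : List Char) : [d] <+: l ↔ l.head? = some d := by
  cases l <;> simp [List.cons_prefix_cons, eq_comm]

theorem pvFind_nonneg_iff (s : List Char) (d : Char) : 0 ≤ PySem.Chars.find s [d] ↔ d ∈ s := by
  rw [PySem.Chars.find_nonneg_iff, List.singleton_infix_iff]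

theorem pvFind_spec {s : List Char} {d : Char} (h : 0 ≤ PySem.Chars.find s [d]) :
    s[(PySem.Chars.find s [d]).toNat]? = some d ∧
    ∀ i < (PySem.Chars.find s [d]).toNat, s[i]? ≠ some d := by
  obtain ⟨h1, h2⟩ := PySem.Chars.find_spec h
  refine ⟨?_, ?_⟩
  · rw [← List.head?_drop]; exact (pv_singleton_prefix _ _).1 h1
  · intro i hi hcon
    exact h2 i hi ((pv_singleton_prefix _ _).2 (by rw [List.head?_drop]; exact hcon))

-- the fold in B only ever lowers its accumulator
theorem pvFold_le_init (s : List Char) (D : List Char) (t : Int) :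
    D.foldl (fun t d => let p := PySem.Chars.find s [d]; if 0 ≤ p ∧ p < t then p else t) t ≤ t := by
  induction D generalizing t with
  | nil => simp
  | cons e D ih =>
    dsimp only [List.foldl_cons]
    refine le_trans (ih _) ?_
    split_ifs with h
    · omega
    · omega

theorem pvFold_le_find (s : List Char) (D : List Char) (t : Int) (d : Char) (hd : d ∈ D)
    (hf : 0 ≤ PySem.Chars.find s [d]) :
    D.foldl (fun t d => let p := PySem.Chars.find s [d]; if 0 ≤ p ∧ p < t then p else t) t ≤
      PySem.Chars.find s [d] := by
  induction D generalizing t with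
  | nil => simp at hd
  | cons e D ih =>
    dsimp only [List.foldl_cons]
    rcases List.mem_cons.mp hd with rfl | hmem
    · refine le_trans (pvFold_le_init s D _) ?_
      split_ifs with h
      · omega
      · omega
    · exact ih _ hmem

theorem pvFold_ge (s : List Char) (D : List Char) (t m : Int) (ht : m ≤ t)
    (hD : ∀ d ∈ D, 0 ≤ PySem.Chars.find s [d] → m ≤ PySem.Chars.find s [d]) :
    m ≤ D.foldl (fun t d => let p := PySem.Chars.find s [d]; if 0 ≤ p ∧ p < t then p else t) t := by
  induction D generalizing t with
  | nil => simpa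
  | cons e D ih =>
    dsimp only [List.foldl_cons]
    refine ih _ ?_ (fun d hd => hD d (List.mem_cons_of_mem _ hd))
    split_ifs with h
    · exact hD e (List.mem_cons_self) h.1
    · exact ht

theorem pvFold_eq (s : List Char) :
    pvB_DELIMS.foldl (fun t d => let p := PySem.Chars.find s [d]; if 0 ≤ p ∧ p < t then p else t)
      (s.length : Int) = (pvQ s : Int) := by
  have hq_le := pvQ_le s
  have hge : (pvQ s : Int) ≤ _ := pvFold_ge s pvB_DELIMS (s.length : Int) (pvQ s : Int)
    (by omega)
    (by
      intro d hd hf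
      by_contra hcon
      rw [Int.not_le] at hcon
      have hlt : (PySem.Chars.find s [d]).toNat < pvQ s := by omega
      exact (pvQ_lt hlt (pvFind_spec hf).1) hd)
  refine le_antisymm ?_ hge
  by_cases hql : pvQ s < s.length
  · obtain ⟨d, hd?, hdD⟩ := pvQ_at hql
    have hmem : d ∈ s := List.mem_of_getElem? hd?
    have hf : 0 ≤ PySem.Chars.find s [d] := (pvFind_nonneg_iff s d).2 hmem
    have hFle : PySem.Chars.find s [d] ≤ (pvQ s : Int) := by
      by_contra hcon
      rw [Int.not_le] at hcon
      exact (pvFind_spec hf).2 (pvQ s) (by omega) hd?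
    exact le_trans (pvFold_le_find s pvB_DELIMS _ d hdD hf) hFle
  · have h : pvQ s = s.length := by omega
    refine le_trans (pvFold_le_init s pvB_DELIMS _) (by omega)

theorem pv_pyGet?_pos {cs : List Char} {k : Int} (h0 : 0 ≤ k) (h : k.toNat < cs.length) :
    PySem.List.pyGet? cs k = some cs[k.toNat] := by
  obtain ⟨n, rfl⟩ : ∃ n : Nat, k = (n : Int) := ⟨k.toNat, (Int.toNat_of_nonneg h0).symm⟩
  simp only [Int.toNat_natCast] at h ⊢
  rw [PySem.List.pyGet?_natCast]
  exact List.getElem?_eq_getElem h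

theorem pvA_inner_eq (cs : List Char) (k : Int) (h0 : 0 ≤ k) (hle : k ≤ (cs.length : Int)) :
    pvA_inner cs k = k + (pvQ (cs.drop k.toNat) : Int) := by
  have H : ∀ (m : Nat) (k : Int), 0 ≤ k → k ≤ (cs.length : Int) → cs.length - k.toNat = m →
      pvA_inner cs k = k + (pvQ (cs.drop k.toNat) : Int) := by
    intro m
    induction m with
    | zero =>
      intro k h0 hle hm
      have hk : cs.drop k.toNat = [] := by
        apply List.drop_eq_nil_of_le; omega
      rw [pvA_inner, dif_neg (by omega : ¬ k < (cs.length : Int)), hk, pvQ_nil]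
      simp
    | succ m ih =>
      intro k h0 hle hm
      have hlt : k.toNat < cs.length := by omega
      have hklt : k < (cs.length : Int) := by omega
      have hget := pv_pyGet?_pos h0 hlt
      have hdrop : cs.drop k.toNat = cs[k.toNat] :: cs.drop (k.toNat + 1) :=
        List.drop_eq_getElem_cons hlt
      rw [pvA_inner, dif_pos hklt, hget]
      show (if cs[k.toNat] ∈ pvA_TOKEN_END then k else pvA_inner cs (k + 1)) =
        k + (pvQ (cs.drop k.toNat) : Int)
      by_cases hc : cs[k.toNat] ∈ pvA_TOKEN_END
      · rw [if_pos hc, hdrop, pvQ_cons_mem ((pv_mem_te_iff _).1 hc)]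
        simp
      · rw [if_neg hc]
        have h1 : (k + 1).toNat = k.toNat + 1 := by omega
        rw [ih (k + 1) (by omega) (by omega) (by omega), h1, hdrop,
          pvQ_cons_not_mem (fun hm' => hc ((pv_mem_te_iff _).2 hm'))]
        push_cast
        ring
  exact H _ k h0 hle rfl

def pvB_body (n : Int) (stripped : List Char) : Option String × Int :=
  match stripped with
  | [] => (none, n)
  | c :: rest =>
    if c = ';' then (none, n)
    else
      let s := c :: rest
      let i : Int := n - s.length
      if c ∈ ['(', ')', '\''] then (some (String.ofList [c]), i + 1)
      else if c = '#' then
        let tok := s.take 2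
        (some (String.ofList tok), i + tok.length)
      else
        let t := pvB_DELIMS.foldl (fun t d =>
            let p := PySem.Chars.find s [d]
            if 0 ≤ p ∧ p < t then p else t) (s.length : Int)
        (some (String.ofList (PySem.List.slice s none (some t))), i + t)

theorem pvB_core_eq (cs : List Char) (k : Int) (h0 : 0 ≤ k) :
    pvB_core cs k =
      pvB_body (cs.length : Int) ((cs.drop k.toNat).dropWhile (fun c => decide (c ∈ pvB_WS))) := by
  unfold pvB_core pvB_body
  rw [PySem.List.slice_from cs h0]

theorem pv_main (cs : List Char) (k : Int) (h0 : 0 ≤ k) : pvA_loop cs k = pvB_core cs k := by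
  have H : ∀ (m : Nat) (k : Int), 0 ≤ k → cs.length - k.toNat = m →
      pvA_loop cs k = pvB_core cs k := by
    intro m
    induction m with
    | zero =>
      intro k h0 hm
      have hk : cs.drop k.toNat = [] := by
        apply List.drop_eq_nil_of_le; omega
      rw [pvA_loop, dif_neg (by omega : ¬ k < (cs.length : Int)), pvB_core_eq cs k h0, hk]
      simp [pvB_body]
    | succ m ih =>
      intro k h0 hm
      have hlt : k.toNat < cs.length := by omega
      have hklt : k < (cs.length : Int) := by omega
      have hget := pv_pyGet?_pos h0 hlt
      have hdrop : cs.drop k.toNat = cs[k.toNat] :: cs.drop (k.toNat + 1) :=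
        List.drop_eq_getElem_cons hlt
      set c := cs[k.toNat] with hc
      set s1 := cs.drop (k.toNat + 1) with hs1
      have hlen : (c :: s1).length = cs.length - k.toNat := by
        simp [hs1]; omega
      rw [pvA_loop, dif_pos hklt, hget]
      show (if c = ';' then ((none : Option String), (cs.length : Int))
          else if c ∈ pvA_WHITESPACE then pvA_loop cs (k + 1)
          else if c ∈ pvA_SINGLE_CHAR_TOKENS then (some (String.ofList [c]), k + 1)
          else if c = '#' then
            (some (String.ofList (PySem.List.slice cs (some k) (some (k + 2)))),
              min (k + 2) (cs.length : Int))
          else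
            (some (String.ofList (PySem.List.slice cs (some k) (some (pvA_inner cs k)))),
              min (pvA_inner cs k) (cs.length : Int))) = pvB_core cs k
      by_cases h1 : c = ';'
      · rw [if_pos h1, pvB_core_eq cs k h0, hdrop,
          List.dropWhile_cons_of_neg (by rw [h1]; decide)]
        simp [pvB_body, h1]
      · by_cases h2 : c ∈ pvA_WHITESPACE
        · rw [if_neg h1, if_pos h2]
          have hw : decide (c ∈ pvB_WS) = true := by
            simp only [pvA_WHITESPACE] at h2
            simp only [pvB_WS]
            simpa using h2
          have hdw : List.dropWhile (fun c => decide (c ∈ pvB_WS)) (c :: s1) =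
              List.dropWhile (fun c => decide (c ∈ pvB_WS)) s1 :=
            List.dropWhile_cons_of_pos (p := fun c => decide (c ∈ pvB_WS)) hw
          rw [pvB_core_eq cs k h0, hdrop, hdw]
          have h1n : (k + 1).toNat = k.toNat + 1 := by omega
          rw [hs1, ← h1n, ← pvB_core_eq cs (k + 1) (by omega)]
          exact ih (k + 1) (by omega) (by omega)
        · have hnw : decide (c ∈ pvB_WS) = false := by
            simp only [pvA_WHITESPACE] at h2
            simp only [pvB_WS]
            simpa using h2
          rw [pvB_core_eq cs k h0, hdrop, List.dropWhile_cons_of_neg (by simp [hnw])]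
          by_cases h3 : c ∈ pvA_SINGLE_CHAR_TOKENS
          · rw [if_neg h1, if_neg h2, if_pos h3]
            have h3' : c ∈ ['(', ')', '\''] := by simpa [pvA_SINGLE_CHAR_TOKENS] using h3
            simp only [pvB_body, if_neg h1, if_pos h3', Prod.mk.injEq]
            refine ⟨trivial, ?_⟩
            omega
          · by_cases h4 : c = '#'
            · rw [if_neg h1, if_neg h2, if_neg h3, if_pos h4]
              have h3' : ¬ c ∈ ['(', ')', '\''] := by rw [h4]; decide
              have hsl2 : PySem.List.slice cs (some k) (some (k + 2)) =
                  (cs.drop k.toNat).take ((k + 2).toNat - k.toNat) :=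
                PySem.List.slice_toNat cs h0 (by omega)
              have h2n : (k + 2).toNat - k.toNat = 2 := by omega
              simp only [pvB_body, if_neg h1, if_neg h3', if_pos h4, Prod.mk.injEq]
              rw [hsl2, h2n, hdrop]
              refine ⟨rfl, ?_⟩
              have hlt2 : ((c :: s1).take 2).length = min 2 (c :: s1).length := by
                simp
                omega
              omega
            · rw [if_neg h1, if_neg h2, if_neg h3, if_neg h4]
              have h3' : ¬ c ∈ ['(', ')', '\''] := by simpa [pvA_SINGLE_CHAR_TOKENS] using h3
              have hj := pvA_inner_eq cs k h0 (le_of_lt hklt)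
              rw [hdrop] at hj
              have hq := pvQ_le (c :: s1)
              simp only [pvB_body, if_neg h1, if_neg h3', if_neg h4, Prod.mk.injEq]
              rw [pvFold_eq (c :: s1), hj]
              have hslA : PySem.List.slice cs (some k) (some (k + (pvQ (c :: s1) : Int))) =
                  (cs.drop k.toNat).take ((k + (pvQ (c :: s1) : Int)).toNat - k.toNat) :=
                PySem.List.slice_toNat cs h0 (by omega)
              have htn : (k + (pvQ (c :: s1) : Int)).toNat - k.toNat = pvQ (c :: s1) := by omega
              have hslB : PySem.List.slice (c :: s1) none (some ((pvQ (c :: s1) : Nat) : Int)) =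
                  (c :: s1).take ((pvQ (c :: s1) : Nat) : Int).toNat :=
                PySem.List.slice_to _ (by omega)
              have htn2 : (((pvQ (c :: s1) : Nat) : Int)).toNat = pvQ (c :: s1) := by omega
              rw [hslA, htn, hdrop, hslB, htn2]
              refine ⟨rfl, ?_⟩
              omega
  exact H _ k h0 rfl

-- ===== VERDICT (by name: the statement is the Claim_ definition above) =====
theorem next_candicate_token_spec : Claim_equal_next_candicate_token := by
  intro line k _ hpre
  show next_candicate_token line k = next_candicate_token_alt line k
  exact pv_main line.toList k hpre
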